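-- pv_equiv track=rewrite | github.com/Ander456/py_program | day88.py | CountNextElement2
-- ===== SOURCE A (Python) =====
-- def CountNextElement2(nums):
--     ans = 0
--     for i in nums:
--         for j in nums:
--             if j == i + 1:
--                 ans += 1
--                 break
--     return ans
-- ===== SOURCE B (Python) =====
-- def CountNextElement2(nums):
--     cnt = {}
--     for v in nums:
--         cnt[v] = cnt.get(v, 0) + 1
--     ans = 0
--     for v, c in cnt.items():
--         if v + 1 in cnt:
--             ans += c
--     return ans
-- ===== Notes on version B (the rewrite author's own statement) =====
-- stated objective: faster
-- what changed: Replaces the nested quadratic scan with a single counting-dict pass: build value->multiplicity once, then sum the multiplicities of distinct values whose successor is a key.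
import Mathlib
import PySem

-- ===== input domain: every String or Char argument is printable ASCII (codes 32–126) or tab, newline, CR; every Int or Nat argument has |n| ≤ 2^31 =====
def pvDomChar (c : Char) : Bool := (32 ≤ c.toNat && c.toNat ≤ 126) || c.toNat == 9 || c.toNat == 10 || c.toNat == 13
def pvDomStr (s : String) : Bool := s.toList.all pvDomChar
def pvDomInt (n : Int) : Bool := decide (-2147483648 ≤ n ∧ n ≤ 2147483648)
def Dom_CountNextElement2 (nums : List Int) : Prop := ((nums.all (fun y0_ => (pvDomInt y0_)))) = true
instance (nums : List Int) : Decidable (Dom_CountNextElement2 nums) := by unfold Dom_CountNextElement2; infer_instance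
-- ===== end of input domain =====

-- B replaces A's nested quadratic scan by one counting-dict pass (build value->multiplicity,
-- then sum multiplicities of distinct values whose successor is a key); return value equivalence.

-- ===== PORT A =====
-- inner 'for j in nums: if j == i + 1: ans += 1; break'
def pvInnerA (i : Int) : List Int → Int → Int
  | [], ans => ans
  | j :: rest, ans => if j = i + 1 then ans + 1 else pvInnerA i rest ans

def CountNextElement2 (nums : List Int) : Int :=
  nums.foldl (fun ans i => pvInnerA i nums ans) 0

-- ===== PORT B =====
def CountNextElement2_alt (nums : List Int) : Int :=
  let cnt := nums.foldl (fun d v => d.insert v (d.getD v 0 + 1)) PySem.Dict.empty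
  cnt.items.foldl (fun ans kv => if cnt.contains (kv.1 + 1) then ans + kv.2 else ans) 0

-- ===== PRECONDITION & SPEC =====
def Spec_CountNextElement2 (nums : List Int) (out : Int) : Prop := out = CountNextElement2_alt nums
instance (nums : List Int) (out : Int) : Decidable (Spec_CountNextElement2 nums out) := by unfold Spec_CountNextElement2; infer_instance

-- ===== CLAIM (what is proved, stated in full; the proofs are below) =====
def Claim_equal_CountNextElement2 : Prop := ∀ (nums : List Int), Dom_CountNextElement2 nums → Spec_CountNextElement2 nums (CountNextElement2 nums)

-- ===== LEMMAS AND PROOFS =====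

theorem pvInnerA_eq (i : Int) (xs : List Int) (ans : Int) :
    pvInnerA i xs ans = ans + (if (i + 1) ∈ xs then 1 else 0) := by
  induction xs with
  | nil => simp [pvInnerA]
  | cons j rest ih =>
    by_cases h : j = i + 1
    · simp [pvInnerA, h]
    · have h' : ¬ (i + 1 = j) := fun hq => h hq.symm
      simp [pvInnerA, h, ih, h']

-- A's fold equals the indicator count
theorem foldl_indicator (p : Int → Bool) (xs : List Int) (a : Int) :
    xs.foldl (fun ans i => ans + (if p i then 1 else 0)) a = a + (xs.countP p : Int) := by
  induction xs generalizing a with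
  | nil => simp
  | cons x xs ih =>
    simp only [List.foldl_cons, ih, List.countP_cons]
    by_cases h : p x <;> simp [h] <;> ring

theorem A_eq_countP (nums : List Int) :
    CountNextElement2 nums = ((nums.countP (fun i => decide ((i + 1) ∈ nums))) : Int) := by
  unfold CountNextElement2
  have hfun : (fun ans i => pvInnerA i nums ans)
      = (fun ans i => ans + (if (decide ((i + 1) ∈ nums)) then 1 else 0)) := by
    funext ans i
    rw [pvInnerA_eq]
    by_cases h : (i + 1) ∈ nums <;> simp [h]
  rw [hfun, foldl_indicator]
  simp

-- B's fold over pairs equals a map-sum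
theorem foldl_pairs (q : Int × Int → Bool) (l : List (Int × Int)) (a : Int) :
    l.foldl (fun ans kv => if q kv then ans + kv.2 else ans) a
      = a + (l.map (fun kv => if q kv then kv.2 else 0)).sum := by
  induction l generalizing a with
  | nil => simp
  | cons kv l ih =>
    simp only [List.foldl_cons, List.map_cons, List.sum_cons, ih]
    by_cases h : q kv <;> simp [h] <;> ring

-- delta sum over a nodup list
theorem sum_delta (ks : List Int) (x : Int) (c : Int) (hnd : ks.Nodup) (hx : x ∈ ks) :
    (ks.map (fun k => if k = x then c else 0)).sum = c := by
  induction ks with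
  | nil => simp at hx
  | cons k ks ih =>
    have hk := List.nodup_cons.mp hnd
    rcases List.mem_cons.mp hx with h | h
    · have hz : (ks.map (fun k' => if k' = x then c else 0)).sum = 0 := by
        rw [List.sum_eq_zero]
        intro y hy
        rcases List.mem_map.mp hy with ⟨k', hk', rfl⟩
        have : ¬ (k' = x) := fun he => hk.1 (h ▸ he ▸ hk')
        simp [this]
      subst h
      simp [hz]
    · have hkx : ¬ (k = x) := fun he => hk.1 (he ▸ h)
      simp [hkx, ih hk.2 h]

-- main counting identity: sum over distinct keys of (count · indicator) = countP
theorem sum_map_add' (l : List Int) (f g : Int → Int) :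
    (l.map (fun k => f k + g k)).sum = (l.map f).sum + (l.map g).sum := by
  induction l with
  | nil => simp
  | cons k l ih => simp [ih]; ring

theorem sum_count_eq_countP (p : Int → Bool) (ks : List Int) (xs : List Int)
    (hnd : ks.Nodup) (hsub : ∀ y ∈ xs, y ∈ ks) :
    (ks.map (fun k => if p k then (xs.count k : Int) else 0)).sum = (xs.countP p : Int) := by
  induction xs with
  | nil =>
    rw [List.sum_eq_zero]
    · simp
    · intro y hy
      rcases List.mem_map.mp hy with ⟨k, _, rfl⟩
      by_cases h : p k <;> simp [h]
  | cons x xs ih =>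
    have hmap : ks.map (fun k => if p k then ((x :: xs).count k : Int) else 0)
        = ks.map (fun k => (if p k then (xs.count k : Int) else 0)
            + (if k = x then (if p x then (1 : Int) else 0) else 0)) := by
      apply List.map_congr_left
      intro k _
      by_cases hkx : k = x
      · subst hkx
        by_cases h : p k <;> simp [h]
      · have hxk : ¬ (x = k) := fun he => hkx he.symm
        by_cases h : p k <;> simp [h, hxk, hkx]
    rw [hmap, sum_map_add', ih (fun y hy => hsub y (List.mem_cons_of_mem _ hy)),
        sum_delta ks x _ hnd (hsub x (List.mem_cons_self))]
    rw [List.countP_cons]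
    by_cases h : p x <;> simp [h]

theorem B_eq_countP (nums : List Int) :
    CountNextElement2_alt nums = ((nums.countP (fun i => decide ((i + 1) ∈ nums))) : Int) := by
  simp only [CountNextElement2_alt, PySem.Dict.foldl_insert_getD_add_one_eq_counter]
  rw [PySem.Dict.items_counter]
  refine (foldl_pairs (fun kv : Int × Int => (PySem.Dict.counter nums).contains (kv.1 + 1)) _ 0).trans ?_
  rw [List.map_map]
  have hc : ∀ k : Int, (PySem.Dict.counter nums).contains (k + 1) = decide ((k + 1) ∈ nums) := by
    intro k
    simp [PySem.Dict.contains_counter]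
  have hmap : (PySem.Set.ofList nums).map
        ((fun kv : Int × Int => if (fun kv' : Int × Int => (PySem.Dict.counter nums).contains (kv'.1 + 1)) kv then kv.2 else 0)
          ∘ (fun k => (k, (nums.count k : Int))))
      = (PySem.Set.ofList nums).map
          (fun k => if (fun i => decide ((i + 1) ∈ nums)) k then (nums.count k : Int) else 0) := by
    apply List.map_congr_left
    intro k _
    simp [hc k]
  rw [hmap]
  have hmain := sum_count_eq_countP (fun i => decide ((i + 1) ∈ nums)) (PySem.Set.ofList nums)
      nums (PySem.Set.nodup_ofList nums) (fun y hy => (PySem.Set.mem_ofList nums y).mpr hy)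
  simpa using hmain

-- ===== VERDICT (by name: the statement is the Claim_ definition above) =====
theorem CountNextElement2_spec : Claim_equal_CountNextElement2 := by
  intro nums _
  unfold Spec_CountNextElement2
  rw [A_eq_countP, B_eq_countP]
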